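-- pv_equiv track=rewrite | github.com/Agentic-Environmental-Engineering/GymVerse | gem/gem/envs/RLVE/min_swap_two_permutations_env.py | _compute_min_swaps
-- ===== SOURCE A (Python) =====
-- from typing import Any, Optional, SupportsFloat, Tuple, List, Dict
-- from collections import defaultdict
--
-- def _compute_min_swaps(A: List[int], B: List[int]) -> int:
--     """
--     Compute the minimal number of swaps needed so that both arrays have no duplicates,
--     using the original parity-based DFS on a graph constructed from mismatch positions.
--     """
--     N = len(A)
--     # Map value to list of positions where A[i] != B[i] and the value appears in these mismatches
--     p: Dict[int, List[int]] = defaultdict(list)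
--     for i in range(N):
--         if A[i] != B[i]:
--             p[A[i]].append(i)
--             p[B[i]].append(i)
--
--     # Build graph on positions 0..N-1 with edge weights 0 or 1
--     graph: List[List[Tuple[int, int]]] = [[] for _ in range(N)]
--     for val, occ in p.items():
--         if len(occ) == 2:
--             u, v = occ
--             w = 1 if (A[u] == A[v] or B[u] == B[v]) else 0
--             graph[u].append((v, w))
--             graph[v].append((u, w))
--
--     visited = [False] * N
--     ans = 0
--
--     # Parity-based DFS on each connected component
--     for i in range(N):
--         if not visited[i]:
--             stack: List[Tuple[int, int]] = [(i, 0)]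
--             cnt = [0, 0]
--             while stack:
--                 u, parity = stack.pop()
--                 if visited[u]:
--                     continue
--                 visited[u] = True
--                 cnt[parity] += 1
--                 for v, w in graph[u]:
--                     if not visited[v]:
--                         stack.append((v, parity ^ w))
--             ans += min(cnt)
--
--     assert ans >= 0
--     return ans
-- ===== SOURCE B (Python) =====
-- def _compute_min_swaps(A, B):
--     N = len(A)
--     # value -> (count, first position, last position) over mismatch slots
--     info = {}
--     for i in range(N):
--         if A[i] != B[i]:
--             for x in (A[i], B[i]):
--                 if x in info:
--                     c = info[x]
--                     info[x] = (c[0] + 1, c[1], i)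
--                 else:
--                     info[x] = (1, i, i)
--     edges = [(c[1], c[2]) for c in info.values() if c[0] == 2]
--
--     def neighbours(u):
--         out = []
--         for a, b in edges:
--             if a == u or b == u:
--                 v = b if a == u else a
--                 out.append((v, 1 if A[u] == A[v] or B[u] == B[v] else 0))
--         return out
--
--     seen = set()
--     total = 0
--     for i in range(N):
--         if i not in seen:
--             even = odd = 0
--             todo = [(i, 0)]
--             while todo:
--                 u, parity = todo.pop()
--                 if u in seen:
--                     continue
--                 seen.add(u)
--                 if parity == 0:
--                     even += 1
--                 else:
--                     odd += 1
--                 for v, w in neighbours(u):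
--                     if v not in seen:
--                         todo.append((v, parity ^ w))
--             total += even + odd - max(even, odd)
--     return total
-- ===== Notes on version B (the rewrite author's own statement) =====
-- stated objective: alternative
-- what changed: B drops A's per-value position lists and precomputed weighted adjacency array: it keeps one (count, first, last) triple per value, derives a flat edge list, scans that list for neighbours with edge weights computed at visit time, and tracks visited positions in a set with two scalar parity counters instead of a boolean array indexed by position and a two-cell count list.
import Mathlib
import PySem

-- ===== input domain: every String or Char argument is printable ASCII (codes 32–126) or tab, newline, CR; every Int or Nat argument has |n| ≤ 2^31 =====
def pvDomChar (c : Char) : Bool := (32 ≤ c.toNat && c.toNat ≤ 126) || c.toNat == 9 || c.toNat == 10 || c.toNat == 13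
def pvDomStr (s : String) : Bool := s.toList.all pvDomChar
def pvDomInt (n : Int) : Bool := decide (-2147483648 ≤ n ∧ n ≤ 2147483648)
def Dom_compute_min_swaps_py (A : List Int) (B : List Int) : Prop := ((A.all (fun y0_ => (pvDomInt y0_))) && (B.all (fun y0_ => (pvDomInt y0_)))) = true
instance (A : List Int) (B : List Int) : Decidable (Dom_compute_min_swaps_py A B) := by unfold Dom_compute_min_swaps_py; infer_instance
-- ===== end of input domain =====

-- B replaces A's precomputed weighted adjacency array and per-value position lists by a dict of
-- (count, first, last) triples, an edge list scanned on demand (weights computed at visit time),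
-- and a visited set with scalar parity counters (objective: alternative; the on-demand scan is
-- simpler in state but slower than A's adjacency array on large inputs).

-- ===== PORT A =====

-- termination facts for the DFS while-loops (cited by decreasing_by)
theorem pvIdx_some_lt {n : Nat} {i : Int} {k : Nat} (h : PySem.List.pyIdx? n i = some k) : k < n := by
  unfold PySem.List.pyIdx? at h
  split_ifs at h <;> simp_all <;> omega

theorem pvGetD_idx {α : Type} {xs : List α} {u : Int} {k : Nat} {d : α}
    (h : PySem.List.pyIdx? xs.length u = some k) : PySem.List.pyGetD xs u d = xs.getD k d := by
  simp [PySem.List.pyGetD, PySem.List.pyGet?, h, List.getD]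

theorem pvSetD_idx {α : Type} {xs : List α} {u : Int} {k : Nat} {v : α}
    (h : PySem.List.pyIdx? xs.length u = some k) : PySem.List.pySetD xs u v = xs.set k v := by
  simp [PySem.List.pySetD, PySem.List.pySet?, h]

theorem pvSet_count_lt (xs : List Bool) (u : Int) (k : Nat)
    (hk : PySem.List.pyIdx? xs.length u = some k)
    (hfalse : ¬ (PySem.List.pyGetD xs u false = true)) :
    (PySem.List.pySetD xs u true).count false < xs.count false := by
  have hklt : k < xs.length := pvIdx_some_lt hk
  have hget : xs[k] = false := by
    have := pvGetD_idx (d := false) hk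
    rw [List.getD_eq_getElem _ _ hklt] at this
    simp [this] at hfalse; simp [hfalse]
  rw [pvSetD_idx hk]
  have hpos : 0 < xs.count false := by
    rw [List.count_pos_iff]
    exact hget ▸ List.getElem_mem hklt
  have := List.count_set (a := true) (b := false) (l := xs) (i := k) hklt
  simp [hget] at this
  omega

theorem pv_countP_lt {α : Type} (l : List α) (p q : α → Bool)
    (h : ∀ x ∈ l, q x = true → p x = true) (x : α) (hx : x ∈ l)
    (hp : p x = true) (hq : q x = false) : l.countP q < l.countP p := by
  induction l with
  | nil => cases hx
  | cons a l ih =>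
    rcases List.mem_cons.mp hx with rfl | hx'
    · rw [List.countP_cons, List.countP_cons]
      have h1 : (if q x = true then 1 else 0) = 0 := by simp [hq]
      have h2 : (if p x = true then 1 else 0) = 1 := by simp [hp]
      rw [h1, h2]
      exact Nat.lt_succ_of_le (List.countP_mono_left fun y hy => h y (List.mem_cons_of_mem _ hy))
    · rw [List.countP_cons, List.countP_cons]
      have hle : (if q a = true then 1 else 0) ≤ (if p a = true then 1 else 0) := by
        by_cases hqa : q a = true
        · simp [hqa, h a List.mem_cons_self hqa]
        · simp [hqa]
      have := ih (fun y hy hqy => h y (List.mem_cons_of_mem _ hy) hqy) hx'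
      omega

-- p: value -> positions of the mismatches the value occurs in (defaultdict(list) appends)
def pvPA (Aa Bb : List Int) : PySem.Dict Int (List Int) :=
  (PySem.List.pyRange 0 (Aa.length : Int) 1).foldl (fun d i =>
    if PySem.List.pyGetD Aa i 0 ≠ PySem.List.pyGetD Bb i 0 then
      (d.modify (PySem.List.pyGetD Aa i 0) [] (fun v => v ++ [i])).modify (PySem.List.pyGetD Bb i 0) [] (fun v => v ++ [i])
    else d) PySem.Dict.empty

-- adjacency lists on positions 0..N-1, built from the values with exactly two occurrences
def pvGraphA (Aa Bb : List Int) : List (List (Int × Int)) :=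
  (pvPA Aa Bb).items.foldl (fun g kv =>
    match kv.2 with
    | [u, v] =>
      let w : Int := if PySem.List.pyGetD Aa u 0 = PySem.List.pyGetD Aa v 0 ∨ PySem.List.pyGetD Bb u 0 = PySem.List.pyGetD Bb v 0 then 1 else 0
      let g1 := PySem.List.pySetD g u (PySem.List.pyGetD g u [] ++ [(v, w)])
      PySem.List.pySetD g1 v (PySem.List.pyGetD g1 v [] ++ [(u, w)])
    | _ => g) (List.replicate Aa.length [])

/-- A's `while stack:` loop; the Python stack's top is the list head.  The `pyIdx?` guard only
    makes the recursion total: on the inputs reachable from `compute_min_swaps_py` the popped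
    index is always in range (Python would raise `IndexError` otherwise). -/
def pvDfsA (g : List (List (Int × Int))) :
    List (Int × Int) → List Bool → List Int → List Bool × List Int
  | [], visited, cnt => (visited, cnt)
  | (u, parity) :: rest, visited, cnt =>
    if PySem.List.pyGetD visited u false = true then
      pvDfsA g rest visited cnt
    else if hin : (PySem.List.pyIdx? visited.length u).isSome then
      let visited' := PySem.List.pySetD visited u true
      let cnt' := PySem.List.pySetD cnt parity (PySem.List.pyGetD cnt parity 0 + 1)
      let stack' := (PySem.List.pyGetD g u []).foldl
        (fun st vw => if PySem.List.pyGetD visited' vw.1 false = true then st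
                      else (vw.1, PySem.Int.bxor parity vw.2) :: st) rest
      pvDfsA g stack' visited' cnt'
    else (visited, cnt)
termination_by stack visited _ => (visited.count false, stack.length)
decreasing_by
  · exact Prod.Lex.right _ (Nat.lt_succ_self _)
  · apply Prod.Lex.left
    obtain ⟨k, hk⟩ := Option.isSome_iff_exists.mp hin
    exact pvSet_count_lt _ _ _ hk (by assumption)

-- min(cnt): the parity class sizes; the final `assert ans >= 0` never fires (sum of minima of
-- nonnegative counts), so the return value is the accumulated sum itself.
def compute_min_swaps_py (A : List Int) (B : List Int) : Int :=
  ((PySem.List.pyRange 0 (A.length : Int) 1).foldl (fun st i =>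
    if PySem.List.pyGetD st.1 i false = true then st
    else
      let r := pvDfsA (pvGraphA A B) [(i, 0)] st.1 [0, 0]
      (r.1, st.2 + (PySem.List.min? r.2 (fun x => x)).getD 0))
    (List.replicate A.length false, (0 : Int))).2

-- ===== PORT B =====

-- value -> (count, first position, last position) over mismatch slots
def pvInfoB (Aa Bb : List Int) : PySem.Dict Int (Int × Int × Int) :=
  (PySem.List.pyRange 0 (Aa.length : Int) 1).foldl (fun d i =>
    if PySem.List.pyGetD Aa i 0 ≠ PySem.List.pyGetD Bb i 0 then
      [PySem.List.pyGetD Aa i 0, PySem.List.pyGetD Bb i 0].foldl (fun d x =>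
        match d.get? x with
        | some c => d.insert x (c.1 + 1, c.2.1, i)
        | none => d.insert x (1, i, i)) d
    else d) PySem.Dict.empty

-- [(c[1], c[2]) for c in info.values() if c[0] == 2]
def pvEdgesB (Aa Bb : List Int) : List (Int × Int) :=
  (pvInfoB Aa Bb).values.foldl (fun es c => if c.1 == 2 then es ++ [(c.2.1, c.2.2)] else es) []

-- neighbours(u): scan the edge list, weight computed at visit time
def pvNbrs (Aa Bb : List Int) (edges : List (Int × Int)) (u : Int) : List (Int × Int) :=
  edges.foldl (fun out ab =>
    if ab.1 == u || ab.2 == u then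
      out ++ [(if ab.1 == u then ab.2 else ab.1,
               if PySem.List.pyGetD Aa u 0 = PySem.List.pyGetD Aa (if ab.1 == u then ab.2 else ab.1) 0
                  ∨ PySem.List.pyGetD Bb u 0 = PySem.List.pyGetD Bb (if ab.1 == u then ab.2 else ab.1) 0
               then (1 : Int) else 0)]
    else out) []

-- every node the DFS can ever reach (termination plumbing only: not part of the Python code)
def pvCands (Aa Bb : List Int) : List Int :=
  PySem.List.pyRange 0 (Aa.length : Int) 1 ++ (pvEdgesB Aa Bb).flatMap (fun ab => [ab.1, ab.2])

/-- B's `while todo:` loop; top of the Python stack is the list head.  The `u ∈ cands` guard only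
    makes the recursion total: every node ever pushed is a candidate. -/
def pvDfsB (Aa Bb : List Int) (edges : List (Int × Int)) (cands : List Int) :
    List (Int × Int) → PySem.Set Int → Int → Int → PySem.Set Int × Int × Int
  | [], seen, even, odd => (seen, even, odd)
  | (u, parity) :: rest, seen, even, odd =>
    if PySem.Set.contains seen u = true then
      pvDfsB Aa Bb edges cands rest seen even odd
    else if hc : u ∈ cands then
      let seen' := PySem.Set.add seen u
      let even' := if parity = 0 then even + 1 else even
      let odd' := if parity = 0 then odd else odd + 1
      let todo' := (pvNbrs Aa Bb edges u).foldl
        (fun st vw => if PySem.Set.contains seen' vw.1 = true then st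
                      else (vw.1, PySem.Int.bxor parity vw.2) :: st) rest
      pvDfsB Aa Bb edges cands todo' seen' even' odd'
    else (seen, even, odd)
termination_by todo seen _ _ => (cands.countP (fun c => !PySem.Set.contains seen c), todo.length)
decreasing_by
  · exact Prod.Lex.right _ (Nat.lt_succ_self _)
  · apply Prod.Lex.left
    rename_i hnc
    have hmem : u ∉ seen := by simpa [PySem.Set.contains] using hnc
    have hadd : PySem.Set.add seen u = seen ++ [u] := by
      simp [PySem.Set.add, PySem.Set.contains, hmem]
    refine pv_countP_lt cands _ _ ?_ u hc ?_ ?_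
    · intro x _ hq
      simp only [Bool.not_eq_eq_eq_not, Bool.not_true, Bool.not_eq_true']
      simp only [Bool.not_eq_eq_eq_not, Bool.not_true, Bool.not_eq_true'] at hq
      rw [hadd] at hq
      simp only [PySem.Set.contains, List.contains_append] at hq
      simp only [PySem.Set.contains]
      exact (Bool.or_eq_false_iff.mp hq).1
    · simpa [PySem.Set.contains] using hnc
    · rw [hadd]
      simp only [Bool.not_eq_eq_eq_not, Bool.not_true, Bool.not_eq_true']
      simp [PySem.Set.contains]
def compute_min_swaps_py_alt (A : List Int) (B : List Int) : Int :=
  ((PySem.List.pyRange 0 (A.length : Int) 1).foldl (fun st i =>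
    if PySem.Set.contains st.1 i = true then st
    else
      let r := pvDfsB A B (pvEdgesB A B) (pvCands A B) [(i, 0)] st.1 0 0
      (r.1, st.2 + (r.2.1 + r.2.2 - max r.2.1 r.2.2)))
    (PySem.Set.empty, (0 : Int))).2

-- ===== PRECONDITION & SPEC =====
-- A reads B[i] for every i < len(A): it raises IndexError exactly when len(B) < len(A).
def Pre_compute_min_swaps_py (A : List Int) (B : List Int) : Prop := A.length ≤ B.length
instance (A : List Int) (B : List Int) : Decidable (Pre_compute_min_swaps_py A B) := by unfold Pre_compute_min_swaps_py; infer_instance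
def pvWitness_compute_min_swaps_py : List Int × List Int := ([1, 2, 2, 1], [2, 1, 1, 2])

def Spec_compute_min_swaps_py (A : List Int) (B : List Int) (out : Int) : Prop := out = compute_min_swaps_py_alt A B
instance (A : List Int) (B : List Int) (out : Int) : Decidable (Spec_compute_min_swaps_py A B out) := by unfold Spec_compute_min_swaps_py; infer_instance

-- ===== CLAIM (what is proved, stated in full; the proofs are below) =====
def Claim_equal_compute_min_swaps_py : Prop := ∀ (A : List Int) (B : List Int), Dom_compute_min_swaps_py A B → Pre_compute_min_swaps_py A B → Spec_compute_min_swaps_py A B (compute_min_swaps_py A B)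

-- ===== LEMMAS AND PROOFS =====

-- the mismatch "slots": for each mismatch position i the two values A[i], B[i], in loop order
def pvChunk (Aa Bb : List Int) (i : Int) : List (Int × Int) :=
  if PySem.List.pyGetD Aa i 0 ≠ PySem.List.pyGetD Bb i 0 then
    [(PySem.List.pyGetD Aa i 0, i), (PySem.List.pyGetD Bb i 0, i)]
  else []

def pvSlots (Aa Bb : List Int) : List (Int × Int) :=
  (PySem.List.pyRange 0 (Aa.length : Int) 1).flatMap (pvChunk Aa Bb)

def pvOcc (Aa Bb : List Int) (k : Int) : List Int :=
  ((pvSlots Aa Bb).filter (fun p => p.1 == k)).map (fun p => p.2)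

def pvKeys (Aa Bb : List Int) : List Int :=
  PySem.Set.ofList ((pvSlots Aa Bb).map (fun p => p.1))

def pvW (Aa Bb : List Int) (u v : Int) : Int :=
  if PySem.List.pyGetD Aa u 0 = PySem.List.pyGetD Aa v 0 ∨ PySem.List.pyGetD Bb u 0 = PySem.List.pyGetD Bb v 0 then 1 else 0

def pvEdges (Aa Bb : List Int) : List (Int × Int) :=
  (pvKeys Aa Bb).filterMap (fun k =>
    match pvOcc Aa Bb k with
    | [u, v] => some (u, v)
    | _ => none)

def pvUpd1 (o : Option (Int × Int × Int)) (i : Int) : Int × Int × Int :=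
  match o with
  | some c => (c.1 + 1, c.2.1, i)
  | none => (1, i, i)

def pvUpd (o : Option (Int × Int × Int)) (occ : List Int) : Option (Int × Int × Int) :=
  occ.foldl (fun o i => some (pvUpd1 o i)) o

theorem pvPA_eq (Aa Bb : List Int) :
    pvPA Aa Bb = (pvSlots Aa Bb).foldl (fun d p => d.modify p.1 [] (fun v => v ++ [p.2])) PySem.Dict.empty := by
  unfold pvPA pvSlots
  have key : ∀ (l : List Int) (d : PySem.Dict Int (List Int)),
      l.foldl (fun d i => if PySem.List.pyGetD Aa i 0 ≠ PySem.List.pyGetD Bb i 0 then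
          (d.modify (PySem.List.pyGetD Aa i 0) [] (fun v => v ++ [i])).modify (PySem.List.pyGetD Bb i 0) [] (fun v => v ++ [i])
        else d) d
      = (l.flatMap (pvChunk Aa Bb)).foldl (fun d p => d.modify p.1 [] (fun v => v ++ [p.2])) d := by
    intro l
    induction l with
    | nil => intro d; rfl
    | cons i l ih =>
      intro d
      rw [List.flatMap_cons, List.foldl_append, List.foldl_cons, ih]
      congr 1
      unfold pvChunk
      by_cases h : PySem.List.pyGetD Aa i 0 ≠ PySem.List.pyGetD Bb i 0
      · rw [if_pos h, if_pos h]; rfl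
      · rw [if_neg h, if_neg h]; rfl
  exact key _ _

theorem pvStepB_eq (d : PySem.Dict Int (Int × Int × Int)) (x i : Int) :
    (match d.get? x with
     | some c => d.insert x (c.1 + 1, c.2.1, i)
     | none => d.insert x (1, i, i)) = d.insert x (pvUpd1 (d.get? x) i) := by
  cases h : d.get? x <;> simp [pvUpd1, h]

theorem pvInfoB_eq (Aa Bb : List Int) :
    pvInfoB Aa Bb = (pvSlots Aa Bb).foldl (fun d p => d.insert p.1 (pvUpd1 (d.get? p.1) p.2)) PySem.Dict.empty := by
  unfold pvInfoB pvSlots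
  have key : ∀ (l : List Int) (d : PySem.Dict Int (Int × Int × Int)),
      l.foldl (fun d i => if PySem.List.pyGetD Aa i 0 ≠ PySem.List.pyGetD Bb i 0 then
          [PySem.List.pyGetD Aa i 0, PySem.List.pyGetD Bb i 0].foldl (fun d x =>
            match d.get? x with
            | some c => d.insert x (c.1 + 1, c.2.1, i)
            | none => d.insert x (1, i, i)) d
        else d) d
      = (l.flatMap (pvChunk Aa Bb)).foldl (fun d p => d.insert p.1 (pvUpd1 (d.get? p.1) p.2)) d := by
    intro l
    induction l with
    | nil => intro d; rfl
    | cons i l ih =>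
      intro d
      rw [List.flatMap_cons, List.foldl_append, List.foldl_cons, ih]
      congr 1
      unfold pvChunk
      by_cases h : PySem.List.pyGetD Aa i 0 ≠ PySem.List.pyGetD Bb i 0
      · rw [if_pos h, if_pos h]
        simp only [List.foldl_cons, List.foldl_nil, pvStepB_eq]
      · rw [if_neg h, if_neg h]; rfl
  exact key _ _

theorem pvOccA (Aa Bb : List Int) (k : Int) : (pvPA Aa Bb).getD k [] = pvOcc Aa Bb k := by
  rw [pvPA_eq, PySem.Dict.getD_foldl_modify_append]
  rfl

theorem pvKeysA (Aa Bb : List Int) : (pvPA Aa Bb).keys = pvKeys Aa Bb := by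
  rw [pvPA_eq, PySem.Dict.keys_foldl_modify_key (pvSlots Aa Bb) (fun p => p.1) [] (fun _ p => fun v => v ++ [p.2])]
  rfl

theorem pvKeysA_nodup (Aa Bb : List Int) : (pvPA Aa Bb).keys.Nodup := by
  rw [pvPA_eq]
  exact PySem.Dict.nodup_keys_foldl_modify_key _ _ _ _ _ (by simp [PySem.Dict.empty, PySem.Dict.keys])

theorem pvKeysB (Aa Bb : List Int) : (pvInfoB Aa Bb).keys = pvKeys Aa Bb := by
  rw [pvInfoB_eq, PySem.Dict.keys_foldl_insert_key (pvSlots Aa Bb) (fun p => p.1) (fun d p => pvUpd1 (d.get? p.1) p.2)]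
  rfl

theorem pvKeysB_nodup (Aa Bb : List Int) : (pvInfoB Aa Bb).keys.Nodup := by
  rw [pvInfoB_eq]
  exact PySem.Dict.nodup_keys_foldl_insert_key _ _ _ _ (by simp [PySem.Dict.empty, PySem.Dict.keys])

theorem pvInfo_get_aux (l : List (Int × Int)) :
    ∀ (d : PySem.Dict Int (Int × Int × Int)) (k : Int),
    (l.foldl (fun d p => d.insert p.1 (pvUpd1 (d.get? p.1) p.2)) d).get? k
      = pvUpd (d.get? k) ((l.filter (fun p => p.1 == k)).map (fun p => p.2)) := by
  induction l with
  | nil => intro d k; rfl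
  | cons p l ih =>
    intro d k
    rw [List.foldl_cons, ih]
    by_cases hpk : p.1 = k
    · subst hpk
      rw [List.filter_cons_of_pos (by simp), List.map_cons]
      show pvUpd ((d.insert p.1 (pvUpd1 (d.get? p.1) p.2)).get? p.1) _ = _
      rw [PySem.Dict.get?_insert_self]
      rfl
    · rw [List.filter_cons_of_neg (by simp [hpk])]
      rw [PySem.Dict.get?_insert_of_ne d _ (fun h => hpk h.symm)]

theorem pvInfo_get (Aa Bb : List Int) (k : Int) : (pvInfoB Aa Bb).get? k = pvUpd none (pvOcc Aa Bb k) := by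
  rw [pvInfoB_eq, pvInfo_get_aux]
  rfl

theorem pvUpd_aux (occ : List Int) :
    ∀ (c f l : Int), pvUpd (some (c, f, l)) occ = some (c + occ.length, f, occ.getLastD l) := by
  induction occ with
  | nil => intro c f l; simp [pvUpd]
  | cons j occ ih =>
    intro c f l
    show pvUpd (some (c + 1, f, j)) occ = _
    rw [ih, List.getLastD_cons]
    simp only [List.length_cons]
    congr 1
    push_cast
    ring_nf

theorem pvUpd_spec (occ : List Int) (i : Int) :
    pvUpd none (i :: occ) = some ((1 + occ.length : Int), i, occ.getLastD i) := by
  show pvUpd (some (1, i, i)) occ = _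
  rw [pvUpd_aux]

theorem pvChunk_snd (Aa Bb : List Int) (i : Int) : ∀ p ∈ pvChunk Aa Bb i, p.2 = i := by
  intro p hp
  unfold pvChunk at hp
  by_cases h : PySem.List.pyGetD Aa i 0 ≠ PySem.List.pyGetD Bb i 0
  · rw [if_pos h] at hp
    rcases List.mem_cons.mp hp with rfl | hp2
    · rfl
    · rcases List.mem_singleton.mp hp2 with rfl
      rfl
  · rw [if_neg h] at hp; cases hp

theorem pvChunk_pairwise (Aa Bb : List Int) (i : Int) :
    (pvChunk Aa Bb i).Pairwise (fun p q : Int × Int => p.1 = q.1 → p.2 < q.2) := by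
  unfold pvChunk
  by_cases h : PySem.List.pyGetD Aa i 0 ≠ PySem.List.pyGetD Bb i 0
  · rw [if_pos h]
    refine List.pairwise_cons.mpr ⟨?_, by simp⟩
    intro q hq heq
    rcases List.mem_singleton.mp hq with rfl
    exact absurd heq h
  · rw [if_neg h]; exact List.Pairwise.nil

theorem pvSlots_bounds (Aa Bb : List Int) : ∀ p ∈ pvSlots Aa Bb, 0 ≤ p.2 ∧ p.2 < (Aa.length : Int) := by
  intro p hp
  rcases List.mem_flatMap.mp hp with ⟨i, hi, hpi⟩
  obtain ⟨h1, h2⟩ := PySem.List.mem_pyRange_one.mp hi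
  rw [pvChunk_snd Aa Bb i p hpi]
  exact ⟨h1, h2⟩

theorem pvSlots_pairwise (Aa Bb : List Int) :
    (pvSlots Aa Bb).Pairwise (fun p q : Int × Int => p.1 = q.1 → p.2 < q.2) := by
  unfold pvSlots
  have key : ∀ l : List Int, l.Pairwise (· < ·) →
      (l.flatMap (pvChunk Aa Bb)).Pairwise (fun p q : Int × Int => p.1 = q.1 → p.2 < q.2) := by
    intro l hl
    induction l with
    | nil => simp
    | cons i l ih =>
      rw [List.flatMap_cons]
      rcases List.pairwise_cons.mp hl with ⟨hilt, hl'⟩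
      rw [List.pairwise_append]
      refine ⟨pvChunk_pairwise Aa Bb i, ih hl', ?_⟩
      intro p hp q hq _
      rcases List.mem_flatMap.mp hq with ⟨j, hj, hqj⟩
      rw [pvChunk_snd Aa Bb i p hp, pvChunk_snd Aa Bb j q hqj]
      exact hilt j hj
  exact key _ (PySem.List.pairwise_lt_pyRange_one 0 (Aa.length : Int))

theorem pvOcc_sorted (Aa Bb : List Int) (k : Int) : (pvOcc Aa Bb k).Pairwise (· < ·) := by
  unfold pvOcc
  rw [List.pairwise_map]
  refine List.Pairwise.imp_of_mem ?_ (List.Pairwise.filter _ (pvSlots_pairwise Aa Bb))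
  intro a b ha hb hR
  have ha1 := (List.mem_filter.mp ha).2
  have hb1 := (List.mem_filter.mp hb).2
  rw [beq_iff_eq] at ha1 hb1
  exact hR (by rw [ha1, hb1])

theorem pvOcc_bounds (Aa Bb : List Int) (k : Int) :
    ∀ i ∈ pvOcc Aa Bb k, 0 ≤ i ∧ i < (Aa.length : Int) := by
  intro x hx
  rcases List.mem_map.mp hx with ⟨p, hp, rfl⟩
  exact pvSlots_bounds Aa Bb p (List.mem_filter.mp hp).1

theorem pvMem_keys_iff (Aa Bb : List Int) (k : Int) : k ∈ pvKeys Aa Bb ↔ pvOcc Aa Bb k ≠ [] := by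
  unfold pvKeys pvOcc
  rw [PySem.Set.mem_ofList]
  constructor
  · rintro hk hnil
    rcases List.mem_map.mp hk with ⟨p, hp, rfl⟩
    have hfe := List.map_eq_nil_iff.mp hnil
    exact absurd (by simp) (List.filter_eq_nil_iff.mp hfe p hp)
  · intro hnil
    rcases hfe : (pvSlots Aa Bb).filter (fun p => p.1 == k) with _ | ⟨q, rest⟩
    · exact absurd (by rw [hfe]; rfl) hnil
    · have hq : q ∈ (pvSlots Aa Bb).filter (fun p => p.1 == k) := by
        rw [hfe]; exact List.mem_cons_self
      rcases List.mem_filter.mp hq with ⟨hqs, hq1⟩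
      exact List.mem_map.mpr ⟨q, hqs, beq_iff_eq.mp hq1⟩

theorem pvEdges_props (Aa Bb : List Int) :
    ∀ e ∈ pvEdges Aa Bb, (0 ≤ e.1 ∧ e.1 < (Aa.length : Int)) ∧ (0 ≤ e.2 ∧ e.2 < (Aa.length : Int)) ∧ e.1 < e.2 := by
  intro e he
  unfold pvEdges at he
  rcases List.mem_filterMap.mp he with ⟨k, _, hsome⟩
  rcases hocc : pvOcc Aa Bb k with _ | ⟨u, rest⟩
  · rw [hocc] at hsome; cases hsome
  · rcases rest with _ | ⟨v, rest2⟩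
    · rw [hocc] at hsome; cases hsome
    · rcases rest2 with _ | ⟨w, rest3⟩
      · rw [hocc] at hsome
        have he2 : e = (u, v) := by
          have h := hsome
          simp at h
          exact h.symm
        subst he2
        have hu := pvOcc_bounds Aa Bb k u (by rw [hocc]; exact List.mem_cons_self)
        have hv := pvOcc_bounds Aa Bb k v (by rw [hocc]; exact List.mem_cons_of_mem _ List.mem_cons_self)
        have hsorted := pvOcc_sorted Aa Bb k
        rw [hocc] at hsorted
        exact ⟨hu, hv, (List.pairwise_cons.mp hsorted).1 v List.mem_cons_self⟩
      · rw [hocc] at hsome; cases hsome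

theorem pvElem (Aa Bb : List Int) (k : Int) (hk : k ∈ pvKeys Aa Bb) :
    (if ((pvInfoB Aa Bb).getD k (0, 0, 0)).1 == 2
     then some (((pvInfoB Aa Bb).getD k (0, 0, 0)).2.1, ((pvInfoB Aa Bb).getD k (0, 0, 0)).2.2)
     else none)
    = (match pvOcc Aa Bb k with | [u, v] => some (u, v) | _ => none) := by
  have hocc : pvOcc Aa Bb k ≠ [] := (pvMem_keys_iff Aa Bb k).mp hk
  rcases hx : pvOcc Aa Bb k with _ | ⟨i, rest⟩
  · exact absurd hx hocc
  · have hget : (pvInfoB Aa Bb).getD k (0, 0, 0) = ((1 + rest.length : Int), i, rest.getLastD i) := by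
      show ((pvInfoB Aa Bb).get? k).getD (0, 0, 0) = _
      rw [pvInfo_get, hx, pvUpd_spec]
      rfl
    rw [hget]
    rcases rest with _ | ⟨v, rest2⟩
    · norm_num
    · rcases rest2 with _ | ⟨w, rest3⟩
      · norm_num
      · have hc : (((1 + ((v :: w :: rest3).length : Int))) == 2) = false := by
          rw [beq_eq_false_iff_ne]
          simp only [List.length_cons]
          push_cast
          omega
        rw [hc]
        rfl

theorem pvEdgesB_eq (Aa Bb : List Int) : pvEdgesB Aa Bb = pvEdges Aa Bb := by
  unfold pvEdgesB
  rw [PySem.Dict.values_eq_map_keys _ (pvKeysB_nodup Aa Bb) ((0 : Int), (0 : Int), (0 : Int))]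
  rw [pvKeysB, PySem.List.foldl_append_if, List.nil_append]
  unfold pvEdges
  have main : ∀ ks : List Int, (∀ k ∈ ks, k ∈ pvKeys Aa Bb) →
      List.map (fun c : Int × Int × Int => (c.2.1, c.2.2))
        (List.filter (fun c : Int × Int × Int => c.1 == 2)
          (ks.map (fun k => (pvInfoB Aa Bb).getD k (0, 0, 0))))
      = ks.filterMap (fun k => match pvOcc Aa Bb k with | [u, v] => some (u, v) | _ => none) := by
    intro ks
    induction ks with
    | nil => intro _; rfl
    | cons k ks ih =>
      intro hks
      rw [List.map_cons, List.filter_cons, List.filterMap_cons]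
      have he := pvElem Aa Bb k (hks k List.mem_cons_self)
      rw [← he]
      by_cases hc : (((pvInfoB Aa Bb).getD k (0, 0, 0)).1 == 2) = true
      · rw [if_pos hc, if_pos hc, List.map_cons, ih (fun x hx => hks x (List.mem_cons_of_mem _ hx))]
      · rw [if_neg hc, if_neg hc, ih (fun x hx => hks x (List.mem_cons_of_mem _ hx))]
  exact main _ (fun k hk => hk)

theorem pvW_symm (Aa Bb : List Int) (u v : Int) : pvW Aa Bb u v = pvW Aa Bb v u := by
  unfold pvW
  by_cases h : PySem.List.pyGetD Aa u 0 = PySem.List.pyGetD Aa v 0 ∨ PySem.List.pyGetD Bb u 0 = PySem.List.pyGetD Bb v 0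
  · rw [if_pos h, if_pos (h.imp Eq.symm Eq.symm)]
  · rw [if_neg h, if_neg (fun h' => h (h'.imp Eq.symm Eq.symm))]

theorem pvGetD_oob {α : Type} (xs : List α) (i : Int) (d : α) (h : (xs.length : Int) ≤ i) :
    PySem.List.pyGetD xs i d = d := by
  have hn : PySem.List.pyIdx? xs.length i = none := by
    unfold PySem.List.pyIdx?
    split_ifs <;> first | rfl | omega | (exfalso; omega)
  simp [PySem.List.pyGetD, PySem.List.pyGet?, hn]

def pvGStep (Aa Bb : List Int) (g : List (List (Int × Int))) (uv : Int × Int) : List (List (Int × Int)) :=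
  let w := pvW Aa Bb uv.1 uv.2
  let g1 := PySem.List.pySetD g uv.1 (PySem.List.pyGetD g uv.1 [] ++ [(uv.2, w)])
  PySem.List.pySetD g1 uv.2 (PySem.List.pyGetD g1 uv.2 [] ++ [(uv.1, w)])

theorem pvGraphA_eq (Aa Bb : List Int) :
    pvGraphA Aa Bb = (pvEdges Aa Bb).foldl (pvGStep Aa Bb) (List.replicate Aa.length []) := by
  unfold pvGraphA pvEdges
  rw [PySem.Dict.items_eq_map_keys _ (pvKeysA_nodup Aa Bb) []]
  have hmap : (pvPA Aa Bb).keys.map (fun k => (k, (pvPA Aa Bb).getD k []))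
      = (pvPA Aa Bb).keys.map (fun k => (k, pvOcc Aa Bb k)) :=
    List.map_congr_left (fun k _ => by rw [pvOccA])
  rw [hmap, pvKeysA]
  have main : ∀ (ks : List Int) (g0 : List (List (Int × Int))),
      ((ks.map (fun k => (k, pvOcc Aa Bb k))).foldl (fun g kv =>
        match kv.2 with
        | [u, v] =>
          let w : Int := if PySem.List.pyGetD Aa u 0 = PySem.List.pyGetD Aa v 0 ∨ PySem.List.pyGetD Bb u 0 = PySem.List.pyGetD Bb v 0 then 1 else 0
          let g1 := PySem.List.pySetD g u (PySem.List.pyGetD g u [] ++ [(v, w)])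
          PySem.List.pySetD g1 v (PySem.List.pyGetD g1 v [] ++ [(u, w)])
        | _ => g) g0)
      = ((ks.filterMap (fun k => match pvOcc Aa Bb k with | [u, v] => some (u, v) | _ => none)).foldl (pvGStep Aa Bb) g0) := by
    intro ks
    induction ks with
    | nil => intro g0; rfl
    | cons k ks ih =>
      intro g0
      rcases hocc : pvOcc Aa Bb k with _ | ⟨u, rest⟩
      · simp only [List.map_cons, List.foldl_cons, List.filterMap_cons, hocc]
        rw [ih]
      · rcases rest with _ | ⟨v, rest2⟩
        · simp only [List.map_cons, List.foldl_cons, List.filterMap_cons, hocc]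
          rw [ih]
        · rcases rest2 with _ | ⟨w, rest3⟩
          · simp only [List.map_cons, List.foldl_cons, List.filterMap_cons, hocc]
            rw [ih]
            rfl
          · simp only [List.map_cons, List.foldl_cons, List.filterMap_cons, hocc]
            rw [ih]
  exact main _ _

theorem pvNbrs_eq (Aa Bb : List Int) (E : List (Int × Int)) (u : Int) :
    pvNbrs Aa Bb E u = (E.filter (fun ab => ab.1 == u || ab.2 == u)).map (fun ab =>
      (if ab.1 == u then ab.2 else ab.1, pvW Aa Bb u (if ab.1 == u then ab.2 else ab.1))) := by
  unfold pvNbrs pvW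
  rw [PySem.List.foldl_append_if]
  rfl

theorem pvGstep2_getD (Aa Bb : List Int) (g0 : List (List (Int × Int))) (a b u : Int)
    (hlen : g0.length = Aa.length) (ha0 : 0 ≤ a) (haN : a < (Aa.length : Int))
    (hb0 : 0 ≤ b) (hbN : b < (Aa.length : Int)) (hab : a < b) (hu : 0 ≤ u) :
    PySem.List.pyGetD (pvGStep Aa Bb g0 (a, b)) u []
      = PySem.List.pyGetD g0 u [] ++
        (if ((a, b).1 == u || (a, b).2 == u) = true then
          [((if (a, b).1 == u then (a, b).2 else (a, b).1),
            pvW Aa Bb u (if (a, b).1 == u then (a, b).2 else (a, b).1))]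
        else []) := by
  obtain ⟨an, rfl⟩ : ∃ n : Nat, a = (n : Int) := ⟨a.toNat, (Int.toNat_of_nonneg ha0).symm⟩
  obtain ⟨bn, rfl⟩ : ∃ n : Nat, b = (n : Int) := ⟨b.toNat, (Int.toNat_of_nonneg hb0).symm⟩
  obtain ⟨un, rfl⟩ : ∃ n : Nat, u = (n : Int) := ⟨u.toNat, (Int.toNat_of_nonneg hu).symm⟩
  have h1 : an < g0.length := by omega
  have h2 : bn < (PySem.List.pySetD g0 (an : Int) (PySem.List.pyGetD g0 (an : Int) [] ++ [((bn : Int), pvW Aa Bb (an : Int) (bn : Int))])).length := by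
    rw [PySem.List.length_pySetD]; omega
  have hba : ¬(bn = an) := by omega
  simp only [pvGStep]
  rw [PySem.List.pyGetD_pySetD_natCast _ _ un _ _ h2]
  rw [PySem.List.pyGetD_pySetD_natCast _ _ bn _ _ h1]
  rw [if_neg hba]
  by_cases hub : un = bn
  · subst hub
    rw [if_pos rfl]
    have hau : ((an : Int) == (un : Int)) = false := by
      rw [beq_eq_false_iff_ne]; intro hh; exact hba (by exact_mod_cast hh.symm)
    rw [if_pos (show (((an : Int) == (un : Int)) || ((un : Int) == (un : Int))) = true by simp)]
    rw [if_neg (show ¬(((an : Int) == (un : Int)) = true) by simp [hau])]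
    rw [pvW_symm]
  · rw [if_neg hub]
    by_cases hua : un = an
    · subst hua
      rw [PySem.List.pyGetD_pySetD_natCast _ _ un _ _ h1, if_pos rfl]
      simp
    · rw [PySem.List.pyGetD_pySetD_natCast _ _ un _ _ h1, if_neg hua]
      have hau : ((an : Int) == (un : Int)) = false := by
        rw [beq_eq_false_iff_ne]; intro hh; exact hua (by exact_mod_cast hh.symm)
      have hbu : ((bn : Int) == (un : Int)) = false := by
        rw [beq_eq_false_iff_ne]; intro hh; exact hub (by exact_mod_cast hh.symm)
      rw [if_neg (show ¬((((an : Int) == (un : Int)) || ((bn : Int) == (un : Int))) = true) by simp [hau, hbu])]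
      simp

theorem pvScan (Aa Bb : List Int) (E : List (Int × Int)) :
    ∀ (g0 : List (List (Int × Int))) (u : Int),
    (∀ e ∈ E, (0 ≤ e.1 ∧ e.1 < (Aa.length : Int)) ∧ (0 ≤ e.2 ∧ e.2 < (Aa.length : Int)) ∧ e.1 < e.2) →
    g0.length = Aa.length → 0 ≤ u →
    PySem.List.pyGetD (E.foldl (pvGStep Aa Bb) g0) u [] = PySem.List.pyGetD g0 u [] ++ pvNbrs Aa Bb E u := by
  induction E with
  | nil => intro g0 u _ _ _; simp [pvNbrs]
  | cons e E ih =>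
    intro g0 u hE hlen hu
    obtain ⟨⟨ha0, haN⟩, ⟨hb0, hbN⟩, hab⟩ := hE e List.mem_cons_self
    rw [List.foldl_cons]
    rw [ih (pvGStep Aa Bb g0 e) u (fun x hx => hE x (List.mem_cons_of_mem _ hx))
        (by simp [pvGStep, PySem.List.length_pySetD, hlen]) hu]
    obtain ⟨a, b⟩ := e
    rw [pvGstep2_getD Aa Bb g0 a b u hlen ha0 haN hb0 hbN hab hu]
    rw [pvNbrs_eq, pvNbrs_eq, List.filter_cons]
    by_cases hc : ((a, b).1 == u || (a, b).2 == u) = true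
    · rw [if_pos hc, if_pos hc, List.map_cons, List.append_assoc]
      rfl
    · rw [if_neg hc, if_neg hc, List.append_nil]

theorem pvGraphA_scan (Aa Bb : List Int) (u : Int) (hu : 0 ≤ u) :
    PySem.List.pyGetD (pvGraphA Aa Bb) u [] = pvNbrs Aa Bb (pvEdges Aa Bb) u := by
  rw [pvGraphA_eq]
  rw [pvScan Aa Bb (pvEdges Aa Bb) _ u (pvEdges_props Aa Bb) (by simp) hu]
  by_cases huN : u < (Aa.length : Int)
  · rw [PySem.List.pyGetD_eq_getElem _ _ hu (by simpa using huN)]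
    simp
  · rw [pvGetD_oob _ _ _ (by simpa using not_lt.mp huN)]
    simp

theorem pvNbrs_props (Aa Bb : List Int) (u : Int) :
    ∀ vw ∈ pvNbrs Aa Bb (pvEdgesB Aa Bb) u,
      (0 ≤ vw.1 ∧ vw.1 < (Aa.length : Int)) ∧ vw.1 ∈ pvCands Aa Bb ∧ (vw.2 = 0 ∨ vw.2 = 1) := by
  intro vw hvw
  rw [pvNbrs_eq] at hvw
  rcases List.mem_map.mp hvw with ⟨ab, hab, rfl⟩
  have habE : ab ∈ pvEdgesB Aa Bb := (List.mem_filter.mp hab).1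
  have habE' : ab ∈ pvEdges Aa Bb := by rw [← pvEdgesB_eq]; exact habE
  obtain ⟨hA, hB, _⟩ := pvEdges_props Aa Bb ab habE'
  refine ⟨?_, ?_, ?_⟩
  · dsimp only
    by_cases h : (ab.1 == u) = true
    · rw [if_pos h]; exact hB
    · rw [if_neg h]; exact hA
  · dsimp only
    unfold pvCands
    refine List.mem_append_right _ (List.mem_flatMap.mpr ⟨ab, habE, ?_⟩)
    by_cases h : (ab.1 == u) = true
    · rw [if_pos h]; simp
    · rw [if_neg h]; simp
  · dsimp only
    unfold pvW
    split <;> split <;> first | exact Or.inl rfl | exact Or.inr rfl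

theorem pvBxor01 (p w : Int) (hp : p = 0 ∨ p = 1) (hw : w = 0 ∨ w = 1) :
    PySem.Int.bxor p w = 0 ∨ PySem.Int.bxor p w = 1 := by
  rcases hp with rfl | rfl <;> rcases hw with rfl | rfl <;> simp [PySem.Int.bxor]

theorem pvDfsB_nil (Aa Bb : List Int) (edges : List (Int × Int)) (cands : List Int)
    (seen : PySem.Set Int) (e o : Int) :
    pvDfsB Aa Bb edges cands [] seen e o = (seen, e, o) := by
  rw [pvDfsB]

theorem pvDfsB_skip (Aa Bb : List Int) (edges : List (Int × Int)) (cands : List Int)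
    (u parity : Int) (rest : List (Int × Int)) (seen : PySem.Set Int) (e o : Int)
    (h : PySem.Set.contains seen u = true) :
    pvDfsB Aa Bb edges cands ((u, parity) :: rest) seen e o = pvDfsB Aa Bb edges cands rest seen e o := by
  have hmem : u ∈ seen := by simpa [PySem.Set.contains] using h
  rw [pvDfsB]
  simp [hmem]

theorem pvDfsB_go (Aa Bb : List Int) (edges : List (Int × Int)) (cands : List Int)
    (u parity : Int) (rest : List (Int × Int)) (seen : PySem.Set Int) (e o : Int)
    (h1 : PySem.Set.contains seen u = false) (h2 : u ∈ cands) :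
    pvDfsB Aa Bb edges cands ((u, parity) :: rest) seen e o
      = pvDfsB Aa Bb edges cands
          ((pvNbrs Aa Bb edges u).foldl
            (fun st vw => if PySem.Set.contains (PySem.Set.add seen u) vw.1 = true then st
                          else (vw.1, PySem.Int.bxor parity vw.2) :: st) rest)
          (PySem.Set.add seen u) (if parity = 0 then e + 1 else e) (if parity = 0 then o else o + 1) := by
  have hmem : u ∉ seen := by simpa [PySem.Set.contains] using h1
  rw [pvDfsB]
  simp [hmem, h2]

-- the state relation of the two DFS loops
def pvRel (N : Int) (visited : List Bool) (seen : PySem.Set Int) : Prop :=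
  visited.length = N.toNat ∧ (∀ x ∈ seen, 0 ≤ x ∧ x < N) ∧
  (∀ v : Int, 0 ≤ v → v < N → PySem.List.pyGetD visited v false = PySem.Set.contains seen v)

def pvStackOK (N : Int) (cands : List Int) (st : List (Int × Int)) : Prop :=
  ∀ p ∈ st, (0 ≤ p.1 ∧ p.1 < N) ∧ p.1 ∈ cands ∧ (p.2 = 0 ∨ p.2 = 1)

theorem pvPush_cong (N : Int) (cands : List Int) (visited' : List Bool) (seen' : PySem.Set Int) (parity : Int)
    (hrel : pvRel N visited' seen') (hpar : parity = 0 ∨ parity = 1) :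
    ∀ (L rest : List (Int × Int)),
    (∀ vw ∈ L, (0 ≤ vw.1 ∧ vw.1 < N) ∧ vw.1 ∈ cands ∧ (vw.2 = 0 ∨ vw.2 = 1)) →
    pvStackOK N cands rest →
    (L.foldl (fun st vw => if PySem.List.pyGetD visited' vw.1 false = true then st
        else (vw.1, PySem.Int.bxor parity vw.2) :: st) rest
      = L.foldl (fun st vw => if PySem.Set.contains seen' vw.1 = true then st
        else (vw.1, PySem.Int.bxor parity vw.2) :: st) rest)
    ∧ pvStackOK N cands (L.foldl (fun st vw => if PySem.List.pyGetD visited' vw.1 false = true then st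
        else (vw.1, PySem.Int.bxor parity vw.2) :: st) rest) := by
  intro L
  induction L with
  | nil => intro rest _ h2; exact ⟨rfl, h2⟩
  | cons vw L ih =>
    intro rest hL hrest
    have hv := hL vw List.mem_cons_self
    have hcond : PySem.List.pyGetD visited' vw.1 false = PySem.Set.contains seen' vw.1 :=
      hrel.2.2 _ hv.1.1 hv.1.2
    simp only [List.foldl_cons]
    rw [hcond]
    exact ih _ (fun x hx => hL x (List.mem_cons_of_mem _ hx)) (by
      by_cases hc : PySem.Set.contains seen' vw.1 = true
      · rw [if_pos hc]; exact hrest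
      · rw [if_neg hc]
        intro p hp
        rcases List.mem_cons.mp hp with rfl | hp'
        · exact ⟨hv.1, hv.2.1, pvBxor01 parity vw.2 hpar hv.2.2⟩
        · exact hrest p hp')

theorem pvDfs_cong (Aa Bb : List Int) (g : List (List (Int × Int))) (cands : List Int)
    (hnbr : ∀ u, 0 ≤ u → u < (Aa.length : Int) → PySem.List.pyGetD g u [] = pvNbrs Aa Bb (pvEdgesB Aa Bb) u)
    (hprops : ∀ u, ∀ vw ∈ pvNbrs Aa Bb (pvEdgesB Aa Bb) u,
      (0 ≤ vw.1 ∧ vw.1 < (Aa.length : Int)) ∧ vw.1 ∈ cands ∧ (vw.2 = 0 ∨ vw.2 = 1)) :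
    ∀ stack visited cnt, ∀ (seen : PySem.Set Int) (even odd : Int),
      pvRel (Aa.length : Int) visited seen → pvStackOK (Aa.length : Int) cands stack →
      cnt = [even, odd] →
      pvRel (Aa.length : Int) (pvDfsA g stack visited cnt).1
        (pvDfsB Aa Bb (pvEdgesB Aa Bb) cands stack seen even odd).1 ∧
      (pvDfsA g stack visited cnt).2 =
        [(pvDfsB Aa Bb (pvEdgesB Aa Bb) cands stack seen even odd).2.1,
         (pvDfsB Aa Bb (pvEdgesB Aa Bb) cands stack seen even odd).2.2] := by
  intro stack visited cnt
  fun_induction pvDfsA g stack visited cnt with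
  | case1 visited cnt =>
    intro seen even odd hrel hstk hcnt
    rw [pvDfsB_nil]
    exact ⟨hrel, hcnt⟩
  | case2 u parity rest visited cnt hvis ih =>
    intro seen even odd hrel hstk hcnt
    have hu := hstk (u, parity) List.mem_cons_self
    have hcs : PySem.Set.contains seen u = true := by
      rw [← hrel.2.2 u hu.1.1 hu.1.2]; exact hvis
    rw [pvDfsB_skip _ _ _ _ _ _ _ _ _ _ hcs]
    exact ih seen even odd hrel (fun p hp => hstk p (List.mem_cons_of_mem _ hp)) hcnt
  | case3 u parity rest visited cnt hvis hin visited_ cnt_ stack_ ih =>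
    intro seen even odd hrel hstk hcnt
    obtain ⟨⟨hu0, huN⟩, hucand, hpar⟩ := hstk (u, parity) List.mem_cons_self
    have hvisf : PySem.List.pyGetD visited u false = false := by
      cases h : PySem.List.pyGetD visited u false
      · rfl
      · exact absurd h hvis
    have hcs : PySem.Set.contains seen u = false := by rw [← hrel.2.2 u hu0 huN]; exact hvisf
    have hmemseen : u ∉ seen := by
      intro hm
      rw [show PySem.Set.contains seen u = true by simpa [PySem.Set.contains] using hm] at hcs
      cases hcs
    have hadd : PySem.Set.add seen u = seen ++ [u] := by
      simp [PySem.Set.add, PySem.Set.contains, hmemseen]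
    have hset : PySem.List.pySetD visited u true = visited.set u.toNat true :=
      PySem.List.pySetD_of_nonneg visited true hu0
    have hlenv : (visited.length : Int) = (Aa.length : Int) := by rw [hrel.1]; simp
    have hrelN : pvRel (Aa.length : Int) (PySem.List.pySetD visited u true) (PySem.Set.add seen u) := by
      refine ⟨by rw [PySem.List.length_pySetD]; exact hrel.1, ?_, ?_⟩
      · intro x hx
        rw [hadd] at hx
        rcases List.mem_append.mp hx with hx | hx
        · exact hrel.2.1 x hx
        · rcases List.mem_singleton.mp hx with rfl
          exact ⟨hu0, huN⟩
      · intro v hv0 hvN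
        rw [hset]
        by_cases hvu : v = u
        · subst hvu
          rw [PySem.List.pyGetD_eq_getElem _ _ hv0 (by rw [List.length_set]; omega)]
          rw [List.getElem_set, if_pos rfl, hadd]
          symm
          simp [PySem.Set.contains]
        · have htn : ¬(u.toNat = v.toNat) := by omega
          rw [PySem.List.pyGetD_eq_getElem _ _ hv0 (by rw [List.length_set]; omega)]
          rw [List.getElem_set, if_neg htn]
          rw [← PySem.List.pyGetD_eq_getElem _ _ hv0 (by omega)]
          rw [hrel.2.2 v hv0 hvN, hadd]
          simp [PySem.Set.contains, hvu]
    have hcntN : PySem.List.pySetD cnt parity (PySem.List.pyGetD cnt parity 0 + 1)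
        = [if parity = 0 then even + 1 else even, if parity = 0 then odd else odd + 1] := by
      subst hcnt
      rcases hpar with rfl | rfl
      · rfl
      · rfl
    have hL := hnbr u hu0 huN
    have hpush := pvPush_cong (Aa.length : Int) cands _ (PySem.Set.add seen u) parity hrelN hpar
      (pvNbrs Aa Bb (pvEdgesB Aa Bb) u) rest (hprops u)
      (fun p hp => hstk p (List.mem_cons_of_mem _ hp))
    rw [pvDfsB_go _ _ _ _ _ _ _ _ _ _ hcs hucand]
    have hstack : (PySem.List.pyGetD g u []).foldl
        (fun st vw => if PySem.List.pyGetD (PySem.List.pySetD visited u true) vw.1 false = true then st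
                      else (vw.1, PySem.Int.bxor parity vw.2) :: st) rest
        = (pvNbrs Aa Bb (pvEdgesB Aa Bb) u).foldl
        (fun st vw => if PySem.Set.contains (PySem.Set.add seen u) vw.1 = true then st
                      else (vw.1, PySem.Int.bxor parity vw.2) :: st) rest := by
      rw [hL]
      exact hpush.1
    have hstkN : pvStackOK (Aa.length : Int) cands
        ((PySem.List.pyGetD g u []).foldl
          (fun st vw => if PySem.List.pyGetD (PySem.List.pySetD visited u true) vw.1 false = true then st
                        else (vw.1, PySem.Int.bxor parity vw.2) :: st) rest) := by
      rw [hL]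
      exact hpush.2
    rw [← hstack]
    exact ih (PySem.Set.add seen u) (if parity = 0 then even + 1 else even)
      (if parity = 0 then odd else odd + 1) hrelN hstkN hcntN
  | case4 u parity rest visited cnt hvis hin =>
    intro seen even odd hrel hstk hcnt
    exfalso
    obtain ⟨⟨hu0, huN⟩, _, _⟩ := hstk (u, parity) List.mem_cons_self
    apply hin
    have hlenv : (visited.length : Int) = (Aa.length : Int) := by rw [hrel.1]; simp
    unfold PySem.List.pyIdx?
    rw [if_pos hu0, if_pos (by omega)]
    exact Option.isSome_some

theorem pvMin2 (a b : Int) : (PySem.List.min? [a, b] (fun x => x)).getD 0 = a + b - max a b := by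
  simp [PySem.List.min?]
  by_cases h : b < a <;> simp [h] <;> omega

theorem pv_main (Aa Bb : List Int) : compute_min_swaps_py Aa Bb = compute_min_swaps_py_alt Aa Bb := by
  unfold compute_min_swaps_py compute_min_swaps_py_alt
  have hnbr : ∀ u, 0 ≤ u → u < (Aa.length : Int) →
      PySem.List.pyGetD (pvGraphA Aa Bb) u [] = pvNbrs Aa Bb (pvEdgesB Aa Bb) u := by
    intro u hu0 _
    rw [pvGraphA_scan Aa Bb u hu0, pvEdgesB_eq]
  have key : ∀ (l : List Int),
      (∀ i ∈ l, (0 ≤ i ∧ i < (Aa.length : Int)) ∧ i ∈ pvCands Aa Bb) →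
      ∀ (visited : List Bool) (seen : PySem.Set Int) (ansA ansB : Int),
      pvRel (Aa.length : Int) visited seen → ansA = ansB →
      (l.foldl (fun st i =>
        if PySem.List.pyGetD st.1 i false = true then st
        else
          let r := pvDfsA (pvGraphA Aa Bb) [(i, 0)] st.1 [0, 0]
          (r.1, st.2 + (PySem.List.min? r.2 (fun x => x)).getD 0)) (visited, ansA)).2
      = (l.foldl (fun st i =>
        if PySem.Set.contains st.1 i = true then st
        else
          let r := pvDfsB Aa Bb (pvEdgesB Aa Bb) (pvCands Aa Bb) [(i, 0)] st.1 0 0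
          (r.1, st.2 + (r.2.1 + r.2.2 - max r.2.1 r.2.2))) (seen, ansB)).2 := by
    intro l
    induction l with
    | nil => intro _ visited seen ansA ansB _ hans; simpa using hans
    | cons i l ih =>
      intro hl visited seen ansA ansB hrel hans
      obtain ⟨⟨hi0, hiN⟩, hic⟩ := hl i List.mem_cons_self
      rw [List.foldl_cons, List.foldl_cons]
      have hcond : PySem.List.pyGetD visited i false = PySem.Set.contains seen i := hrel.2.2 i hi0 hiN
      rw [hcond]
      by_cases hc : PySem.Set.contains seen i = true
      · rw [if_pos hc, if_pos hc]
        exact ih (fun x hx => hl x (List.mem_cons_of_mem _ hx)) visited seen ansA ansB hrel hans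
      · rw [if_neg hc, if_neg hc]
        have hstk : pvStackOK (Aa.length : Int) (pvCands Aa Bb) [(i, 0)] := by
          intro p hp
          rcases List.mem_singleton.mp hp with rfl
          exact ⟨⟨hi0, hiN⟩, hic, Or.inl rfl⟩
        have hcong := pvDfs_cong Aa Bb (pvGraphA Aa Bb) (pvCands Aa Bb) hnbr
          (fun u => pvNbrs_props Aa Bb u) [(i, 0)] visited [0, 0] seen 0 0 hrel hstk rfl
        exact ih (fun x hx => hl x (List.mem_cons_of_mem _ hx)) _ _ _ _ hcong.1
          (by rw [hcong.2, pvMin2, hans])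
  apply key
  · intro i hi
    have h := PySem.List.mem_pyRange_one.mp hi
    exact ⟨⟨h.1, h.2⟩, by unfold pvCands; exact List.mem_append_left _ hi⟩
  · refine ⟨by simp, ?_, ?_⟩
    · intro x hx; cases hx
    · intro v hv0 hvN
      rw [PySem.List.pyGetD_eq_getElem _ _ hv0 (by simpa using hvN)]
      simp [PySem.Set.contains, PySem.Set.empty]
  · rfl

-- ===== VERDICT (by name: the statement is the Claim_ definition above) =====
theorem compute_min_swaps_py_spec : Claim_equal_compute_min_swaps_py := by
  intro A B _ _
  unfold Spec_compute_min_swaps_py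
  exact pv_main A B
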